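-- pv_equiv track=rewrite | github.com/light/adventofcode | 2021/19/puzzle.py | match_offsets
-- ===== SOURCE A (Python) =====
-- def match_offsets(coords_a, coords_b, min_count):
--   rmin = min(coords_a) - max(coords_b)
--   rmax = max(coords_a) - min(coords_b)
--   offsets = []
--   for d in range(rmin, rmax+1):
--     count = 0
--     ca = coords_a.copy()
--     for b in coords_b:
--       for j, a in enumerate(ca):
--         if a == b+d:
--           count += 1
--           ca.pop(j)
--           break
--       if len(ca) + count < min_count: # Bail out early in case there are not enough elements left to reach min_count
--         break
--     if count >= min_count:
--       offsets.append(d)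
--   return offsets
-- ===== SOURCE B (Python) =====
-- def match_offsets(coords_a, coords_b, min_count):
--     rmin = min(coords_a) - max(coords_b)
--     rmax = max(coords_a) - min(coords_b)
--     if min_count <= 0:
--         # a non-positive threshold is reached by every offset in the scanned range
--         return list(range(rmin, rmax + 1))
--     # multiset counters of both coordinate lists
--     ca = {}
--     for a in coords_a:
--         ca[a] = ca.get(a, 0) + 1
--     cb = {}
--     for b in coords_b:
--         cb[b] = cb.get(b, 0) + 1
--     # only a pairwise difference a-b can reach a positive match count
--     candidates = set()
--     for a in ca:
--         for b in cb:
--             candidates.add(a - b)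
--     offsets = []
--     for d in sorted(candidates):
--         total = 0
--         for v, c in cb.items():
--             total += min(ca.get(v + d, 0), c)
--             if total >= min_count:
--                 break
--         if total >= min_count:
--             offsets.append(d)
--     return offsets
-- ===== Notes on version B (the rewrite author's own statement) =====
-- stated objective: faster
-- what changed: Instead of greedy matching with list mutation for every offset in the whole value range [min(a)-max(b), max(a)-min(b)], B builds frequency counters once, enumerates only the pairwise differences a-b as candidate offsets (sorted), and counts matches as a sum of per-value minimum counts; the trivial min_count<=0 case returns the full range directly.
import Mathlib
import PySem

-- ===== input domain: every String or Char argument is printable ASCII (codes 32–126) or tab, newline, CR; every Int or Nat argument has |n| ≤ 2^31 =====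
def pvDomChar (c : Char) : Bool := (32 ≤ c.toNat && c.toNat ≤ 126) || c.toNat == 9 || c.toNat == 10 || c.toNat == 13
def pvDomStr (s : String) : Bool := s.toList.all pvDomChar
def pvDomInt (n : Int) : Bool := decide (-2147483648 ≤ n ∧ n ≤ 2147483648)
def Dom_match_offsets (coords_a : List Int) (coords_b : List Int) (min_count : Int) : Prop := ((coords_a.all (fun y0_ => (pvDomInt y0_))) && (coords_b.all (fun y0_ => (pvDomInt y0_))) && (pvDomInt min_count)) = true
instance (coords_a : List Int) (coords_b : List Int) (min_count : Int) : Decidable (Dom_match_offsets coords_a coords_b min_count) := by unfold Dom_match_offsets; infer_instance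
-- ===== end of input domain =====

-- B replaces A's scan of the whole offset range [min(a)-max(b), max(a)-min(b)] with greedy matching on a
-- mutated copy per offset by: counters built once, candidate offsets = sorted pairwise differences, and a
-- per-candidate sum of per-value minimum counts (full range returned directly when min_count <= 0).

-- ===== PORT A =====
-- the inner 'for j, a in enumerate(ca): if a == b+d: count += 1; ca.pop(j); break' scan:
-- returns the list with the first occurrence of target popped, or none if no element matched
def pvScanPop (target : Int) : List Int → Option (List Int)
  | [] => none
  | a :: rest => if a = target then some rest else (pvScanPop target rest).map (a :: ·)

-- the 'for b in coords_b' loop carrying (ca, count), with the early bail-out break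
def pvALoop (d min_count : Int) : List Int → List Int → Int → Int
  | [], _, count => count
  | b :: bs, ca, count =>
    match pvScanPop (b + d) ca with
    | some ca' =>
        if (ca'.length : Int) + (count + 1) < min_count then count + 1
        else pvALoop d min_count bs ca' (count + 1)
    | none =>
        if (ca.length : Int) + count < min_count then count
        else pvALoop d min_count bs ca count

def match_offsets (coords_a : List Int) (coords_b : List Int) (min_count : Int) : List Int :=
  -- min()/max() on an empty list raises ValueError: Pre_ excludes empty inputs; the .getD 0 is arbitrary there
  let rmin := (PySem.List.min? coords_a (fun y => y)).getD 0 - (PySem.List.max? coords_b (fun y => y)).getD 0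
  let rmax := (PySem.List.max? coords_a (fun y => y)).getD 0 - (PySem.List.min? coords_b (fun y => y)).getD 0
  (PySem.List.pyRange rmin (rmax + 1)).foldl
    (fun offsets d =>
      if min_count ≤ pvALoop d min_count coords_b coords_a 0 then offsets ++ [d] else offsets) []

-- ===== PORT B =====
-- the 'for v, c in cb.items()' counting loop with its early break
def pvBCount (ca : PySem.Dict Int Int) (d min_count : Int) : List (Int × Int) → Int → Int
  | [], total => total
  | (v, c) :: rest, total =>
      let t := total + min (ca.getD (v + d) 0) c
      if min_count ≤ t then t else pvBCount ca d min_count rest t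

def match_offsets_alt (coords_a : List Int) (coords_b : List Int) (min_count : Int) : List Int :=
  -- min()/max() on an empty list raises ValueError: Pre_ excludes empty inputs; the .getD 0 is arbitrary there
  let rmin := (PySem.List.min? coords_a (fun y => y)).getD 0 - (PySem.List.max? coords_b (fun y => y)).getD 0
  let rmax := (PySem.List.max? coords_a (fun y => y)).getD 0 - (PySem.List.min? coords_b (fun y => y)).getD 0
  if min_count ≤ 0 then
    PySem.List.pyRange rmin (rmax + 1)
  else
    let ca := coords_a.foldl (fun dct x => dct.insert x (dct.getD x 0 + 1)) PySem.Dict.empty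
    let cb := coords_b.foldl (fun dct x => dct.insert x (dct.getD x 0 + 1)) PySem.Dict.empty
    let candidates := ca.keys.foldl (fun s a => cb.keys.foldl (fun s b => PySem.Set.add s (a - b)) s) PySem.Set.empty
    (PySem.List.sorted candidates (fun x => x)).foldl
      (fun offsets d =>
        if min_count ≤ pvBCount ca d min_count cb.items 0 then offsets ++ [d] else offsets) []

-- ===== PRECONDITION & SPEC =====
-- Pre_ excludes only empty coordinate lists, on which Python's min()/max() raises ValueError (in A and in B alike)
def Pre_match_offsets (coords_a : List Int) (coords_b : List Int) (min_count : Int) : Prop :=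
  coords_a ≠ [] ∧ coords_b ≠ []
instance (coords_a : List Int) (coords_b : List Int) (min_count : Int) : Decidable (Pre_match_offsets coords_a coords_b min_count) := by unfold Pre_match_offsets; infer_instance

def pvWitness_match_offsets : List Int × List Int × Int := ([0, 4, 5], [1, 2], 1)

def Spec_match_offsets (coords_a : List Int) (coords_b : List Int) (min_count : Int) (out : List Int) : Prop := out = match_offsets_alt coords_a coords_b min_count
instance (coords_a : List Int) (coords_b : List Int) (min_count : Int) (out : List Int) : Decidable (Spec_match_offsets coords_a coords_b min_count out) := by unfold Spec_match_offsets; infer_instance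

-- ===== CLAIM (what is proved, stated in full; the proofs are below) =====
def Claim_equal_match_offsets : Prop := ∀ (coords_a : List Int) (coords_b : List Int) (min_count : Int), Dom_match_offsets coords_a coords_b min_count → Pre_match_offsets coords_a coords_b min_count → Spec_match_offsets coords_a coords_b min_count (match_offsets coords_a coords_b min_count)

-- ===== LEMMAS AND PROOFS =====

-- abstract greedy matching count (no bail-out, no counter): value of A's inner loops
def pvGreedy (d : Int) : List Int → List Int → Nat
  | [], _ => 0
  | b :: bs, ca => if (b + d) ∈ ca then pvGreedy d bs (ca.erase (b + d)) + 1 else pvGreedy d bs ca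

-- the common reference quantity: sum over distinct b-values of min(count_a(v+d), count_b(v))
def pvSum (coords_a coords_b : List Int) (d : Int) : Nat :=
  ((PySem.Set.ofList coords_b).map
    (fun v => min (List.count (v + d) coords_a) (List.count v coords_b))).sum

lemma pvScanPop_eq (t : Int) (ca : List Int) :
    pvScanPop t ca = if t ∈ ca then some (ca.erase t) else none := by
  induction ca with
  | nil => simp [pvScanPop]
  | cons a rest ih =>
    by_cases h : a = t
    · subst h; simp [pvScanPop]
    · have hne : ¬ t = a := fun hh => h hh.symm
      by_cases ht : t ∈ rest
      · simp [pvScanPop, h, ih, ht, hne]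
      · simp [pvScanPop, h, ih, ht, hne]

lemma pvGreedy_le (d : Int) (bs : List Int) : ∀ ca : List Int, pvGreedy d bs ca ≤ ca.length := by
  induction bs with
  | nil => intro ca; simp [pvGreedy]
  | cons b bs ih =>
    intro ca
    simp only [pvGreedy]
    by_cases h : (b + d) ∈ ca
    · rw [if_pos h]
      have := ih (ca.erase (b + d))
      have hl : (ca.erase (b + d)).length = ca.length - 1 := List.length_erase_of_mem h
      have hpos : 1 ≤ ca.length := List.length_pos_of_mem h
      omega
    · rw [if_neg h]; exact ih ca

lemma pvALoop_ge_iff (d m : Int) (bs : List Int) : ∀ (ca : List Int) (c : Int),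
    (m ≤ pvALoop d m bs ca c) ↔ (m ≤ c + (pvGreedy d bs ca : Int)) := by
  induction bs with
  | nil => intro ca c; simp [pvALoop, pvGreedy]
  | cons b bs ih =>
    intro ca c
    simp only [pvALoop, pvScanPop_eq, pvGreedy]
    by_cases h : (b + d) ∈ ca
    · rw [if_pos h, if_pos h]
      simp only []
      by_cases hb : ((ca.erase (b + d)).length : Int) + (c + 1) < m
      · rw [if_pos hb]
        have hle := pvGreedy_le d bs (ca.erase (b + d))
        constructor
        · intro hh; omega
        · intro hh; omega
      · rw [if_neg hb]
        rw [ih]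
        push_cast
        omega
    · rw [if_neg h, if_neg h]
      simp only []
      by_cases hb : (ca.length : Int) + c < m
      · rw [if_pos hb]
        have hle := pvGreedy_le d bs ca
        constructor <;> intro hh <;> omega
      · rw [if_neg hb, ih]

lemma pv_inter_cons_card (A B : Multiset Int) (x : Int) :
    (A ∩ (x ::ₘ B)).card = if x ∈ A then ((A.erase x) ∩ B).card + 1 else (A ∩ B).card := by
  by_cases h : x ∈ A
  · rw [if_pos h]
    have : A ∩ (x ::ₘ B) = x ::ₘ ((A.erase x) ∩ B) := by
      ext v
      simp only [Multiset.count_inter, Multiset.count_cons]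
      by_cases hv : v = x
      · subst hv
        have h1 : 1 ≤ A.count v := Multiset.one_le_count_iff_mem.mpr h
        have h2 : (A.erase v).count v = A.count v - 1 := Multiset.count_erase_self v A
        simp [h2]; omega
      · have h2 : (A.erase x).count v = A.count v := Multiset.count_erase_of_ne hv A
        simp [hv, h2]
    rw [this, Multiset.card_cons]
  · rw [if_neg h]
    have : A ∩ (x ::ₘ B) = A ∩ B := by
      ext v
      simp only [Multiset.count_inter, Multiset.count_cons]
      by_cases hv : v = x
      · subst hv
        have : A.count v = 0 := Multiset.count_eq_zero.mpr h
        simp [this]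
      · simp [hv]
    rw [this]

lemma pvGreedy_eq_card (d : Int) (bs : List Int) : ∀ ca : List Int,
    pvGreedy d bs ca = ((ca : Multiset Int) ∩ ((bs.map (· + d) : List Int) : Multiset Int)).card := by
  induction bs with
  | nil => intro ca; simp [pvGreedy]
  | cons b bs ih =>
    intro ca
    have hmap : (((b :: bs).map (· + d) : List Int) : Multiset Int)
        = (b + d) ::ₘ ((bs.map (· + d) : List Int) : Multiset Int) := by
      simp
    rw [hmap, pv_inter_cons_card]
    simp only [pvGreedy]
    by_cases h : (b + d) ∈ ca
    · rw [if_pos h, if_pos (by simpa using h), ih (ca.erase (b + d))]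
      rw [← Multiset.coe_erase]
    · rw [if_neg h, if_neg (by simpa using h), ih ca]

lemma pv_card_eq_pvSum (coords_a coords_b : List Int) (d : Int) :
    ((coords_a : Multiset Int) ∩ ((coords_b.map (· + d) : List Int) : Multiset Int)).card
      = pvSum coords_a coords_b d := by
  set A : Multiset Int := (coords_a : Multiset Int) with hA
  set Bd : Multiset Int := ((coords_b.map (· + d) : List Int) : Multiset Int) with hBdDef
  have h1 : (A ∩ Bd).card = ∑ w ∈ (A ∩ Bd).toFinset, (A ∩ Bd).count w :=
    (Multiset.toFinset_sum_count_eq _).symm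
  have hsub : (A ∩ Bd).toFinset ⊆ Bd.toFinset := by
    intro w hw
    rw [Multiset.mem_toFinset] at *
    exact (Multiset.mem_inter.mp hw).2
  have h2 : ∑ w ∈ (A ∩ Bd).toFinset, (A ∩ Bd).count w
      = ∑ w ∈ Bd.toFinset, (A ∩ Bd).count w := by
    refine Finset.sum_subset hsub ?_
    intro w _ hnw
    rw [Multiset.mem_toFinset] at hnw
    exact Multiset.count_eq_zero.mpr hnw
  have hBd : Bd = ((coords_b : Multiset Int)).map (· + d) := by
    rw [hBdDef]; simp
  have hinj : Function.Injective (fun x : Int => x + d) := fun a b h => by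
    simpa using h
  have h3 : Bd.toFinset = ((coords_b : Multiset Int).toFinset).image (fun x => x + d) := by
    rw [hBd, Multiset.toFinset_map]
  have h4 : ∑ w ∈ Bd.toFinset, (A ∩ Bd).count w
      = ∑ v ∈ (coords_b : Multiset Int).toFinset, (A ∩ Bd).count (v + d) := by
    rw [h3]
    exact Finset.sum_image (fun a _ b _ h => hinj h)
  have h5 : ∀ v : Int, (A ∩ Bd).count (v + d)
      = min (List.count (v + d) coords_a) (List.count v coords_b) := by
    intro v
    rw [Multiset.count_inter]
    congr 1
    · simp [hA]
    · rw [hBd]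
      have := Multiset.count_map_eq_count' (fun x : Int => x + d) (coords_b : Multiset Int) hinj v
      simpa using this
  have h6 : (coords_b : Multiset Int).toFinset = (PySem.Set.ofList coords_b).toFinset := by
    ext v
    simp [PySem.Set.mem_ofList]
  have h7 : ∑ v ∈ (PySem.Set.ofList coords_b).toFinset,
        (fun v => min (List.count (v + d) coords_a) (List.count v coords_b)) v
      = ((PySem.Set.ofList coords_b).map
        (fun v => min (List.count (v + d) coords_a) (List.count v coords_b))).sum :=
    List.sum_toFinset _ (PySem.Set.nodup_ofList coords_b)
  calc (A ∩ Bd).card = ∑ w ∈ Bd.toFinset, (A ∩ Bd).count w := by rw [h1, h2]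
    _ = ∑ v ∈ (coords_b : Multiset Int).toFinset, (A ∩ Bd).count (v + d) := h4
    _ = ∑ v ∈ (PySem.Set.ofList coords_b).toFinset,
          min (List.count (v + d) coords_a) (List.count v coords_b) := by
        rw [← h6]; exact Finset.sum_congr rfl (fun v _ => h5 v)
    _ = pvSum coords_a coords_b d := h7

lemma pvBCount_ge_iff (coords_a coords_b : List Int) (d m : Int) (l : List Int) :
    ∀ (t : Int),
    (m ≤ pvBCount (PySem.Dict.counter coords_a) d m
        (l.map (fun k => (k, (List.count k coords_b : Int)))) t)
      ↔ (m ≤ t + ((l.map (fun v => min (List.count (v + d) coords_a) (List.count v coords_b))).sum : Int)) := by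
  induction l with
  | nil => intro t; simp [pvBCount]
  | cons k l ih =>
    intro t
    simp only [List.map_cons, pvBCount, PySem.Dict.getD_counter]
    have hmin : min ((List.count (k + d) coords_a : Int)) ((List.count k coords_b : Int))
        = ((min (List.count (k + d) coords_a) (List.count k coords_b) : Nat) : Int) := by
      push_cast; rfl
    rw [hmin]
    set inc : Nat := min (List.count (k + d) coords_a) (List.count k coords_b) with hinc
    by_cases h : m ≤ t + (inc : Int)
    · rw [if_pos h]
      simp only [List.sum_cons]
      constructor
      · intro _
        have : (0:Int) ≤ ((l.map (fun v => min (List.count (v + d) coords_a) (List.count v coords_b))).sum : Int) := by positivity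
        push_cast at *
        omega
      · intro _; exact h
    · rw [if_neg h, ih]
      simp only [List.sum_cons]
      push_cast
      constructor <;> intro <;> omega

lemma pvCand_mem_gen (keysB : List Int) (keysA : List Int) :
    ∀ (s : PySem.Set Int) (x : Int),
    (x ∈ keysA.foldl (fun s a => keysB.foldl (fun s b => PySem.Set.add s (a - b)) s) s
      ↔ x ∈ s ∨ ∃ a ∈ keysA, ∃ b ∈ keysB, x = a - b) := by
  induction keysA with
  | nil => intro s x; simp
  | cons a keysA ih =>
    intro s x
    simp only [List.foldl_cons]
    rw [ih]
    rw [← PySem.Set.update_map_eq_foldl_add keysB (fun b => a - b) s]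
    rw [PySem.Set.mem_update]
    constructor
    · rintro ((h | h) | ⟨a', ha', b, hb, rfl⟩)
      · exact Or.inl h
      · rcases List.mem_map.mp h with ⟨b, hb, rfl⟩
        exact Or.inr ⟨a, by simp, b, hb, rfl⟩
      · exact Or.inr ⟨a', by simp [ha'], b, hb, rfl⟩
    · rintro (h | ⟨a', ha', b, hb, rfl⟩)
      · exact Or.inl (Or.inl h)
      · rcases List.mem_cons.mp ha' with rfl | ha'
        · exact Or.inl (Or.inr (List.mem_map.mpr ⟨b, hb, rfl⟩))
        · exact Or.inr ⟨a', ha', b, hb, rfl⟩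

lemma pvCand_nodup_gen (keysB : List Int) (keysA : List Int) :
    ∀ (s : PySem.Set Int), s.Nodup →
    (keysA.foldl (fun s a => keysB.foldl (fun s b => PySem.Set.add s (a - b)) s) s).Nodup := by
  induction keysA with
  | nil => intro s hs; simpa
  | cons a keysA ih =>
    intro s hs
    simp only [List.foldl_cons]
    apply ih
    rw [← PySem.Set.update_map_eq_foldl_add keysB (fun b => a - b) s]
    exact PySem.Set.nodup_update _ _ hs

-- ===== VERDICT (by name: the statement is the Claim_ definition above) =====
theorem match_offsets_spec : Claim_equal_match_offsets := by
  intro coords_a coords_b m _ hpre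
  obtain ⟨hA, hB⟩ := hpre
  unfold Spec_match_offsets
  simp only [match_offsets, match_offsets_alt]
  by_cases hm : m ≤ 0
  · rw [if_pos hm, PySem.List.foldl_append_ite_eq_filter, List.nil_append]
    apply List.filter_eq_self.mpr
    intro d _
    simp only [decide_eq_true_eq]
    rw [pvALoop_ge_iff]
    have : (0:Int) ≤ (pvGreedy d coords_b coords_a : Int) := Int.natCast_nonneg _
    omega
  · rw [not_le] at hm
    rw [if_neg (by omega)]
    rw [PySem.Dict.foldl_insert_getD_add_one_eq_counter,
        PySem.Dict.foldl_insert_getD_add_one_eq_counter,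
        PySem.Dict.keys_counter, PySem.Dict.keys_counter,
        PySem.Dict.items_counter,
        PySem.List.foldl_append_ite_eq_filter, PySem.List.foldl_append_ite_eq_filter,
        List.nil_append, List.nil_append]
    -- extrema exist on nonempty lists
    obtain ⟨la, hla⟩ : ∃ x, PySem.List.min? coords_a (fun y => y) = some x := by
      cases hx : PySem.List.min? coords_a (fun y => y) with
      | none => exact absurd ((PySem.List.min?_eq_none_iff _ _).mp hx) hA
      | some x => exact ⟨x, rfl⟩
    obtain ⟨Ma, hMa⟩ : ∃ x, PySem.List.max? coords_a (fun y => y) = some x := by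
      cases hx : PySem.List.max? coords_a (fun y => y) with
      | none => exact absurd ((PySem.List.max?_eq_none_iff _ _).mp hx) hA
      | some x => exact ⟨x, rfl⟩
    obtain ⟨lb, hlb⟩ : ∃ x, PySem.List.min? coords_b (fun y => y) = some x := by
      cases hx : PySem.List.min? coords_b (fun y => y) with
      | none => exact absurd ((PySem.List.min?_eq_none_iff _ _).mp hx) hB
      | some x => exact ⟨x, rfl⟩
    obtain ⟨Mb, hMb⟩ : ∃ x, PySem.List.max? coords_b (fun y => y) = some x := by
      cases hx : PySem.List.max? coords_b (fun y => y) with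
      | none => exact absurd ((PySem.List.max?_eq_none_iff _ _).mp hx) hB
      | some x => exact ⟨x, rfl⟩
    rw [hla, hMa, hlb, hMb]
    simp only [Option.getD_some]
    -- the two predicates, each characterised by pvSum
    have hpred : ∀ d, (m ≤ pvALoop d m coords_b coords_a 0)
        ↔ (m ≤ (pvSum coords_a coords_b d : Int)) := by
      intro d
      rw [pvALoop_ge_iff, pvGreedy_eq_card, pv_card_eq_pvSum, zero_add]
    have hpredB : ∀ d, (m ≤ pvBCount (PySem.Dict.counter coords_a) d m
          ((PySem.Set.ofList coords_b).map (fun k => (k, (List.count k coords_b : Int)))) 0)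
        ↔ (m ≤ (pvSum coords_a coords_b d : Int)) := by
      intro d
      rw [pvBCount_ge_iff coords_a coords_b d m (PySem.Set.ofList coords_b) 0, zero_add]
      rfl
    -- a positive match sum exhibits a matched pair
    have hkey : ∀ d, m ≤ (pvSum coords_a coords_b d : Int) →
        ∃ v, v + d ∈ coords_a ∧ v ∈ coords_b := by
      intro d hd
      have hpos : pvSum coords_a coords_b d ≠ 0 := by
        intro h0
        rw [h0] at hd
        simp at hd
        omega
      obtain ⟨x, hx, hxne⟩ : ∃ x ∈ (PySem.Set.ofList coords_b).map
          (fun v => min (List.count (v + d) coords_a) (List.count v coords_b)), x ≠ 0 := by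
        by_contra hall
        push Not at hall
        exact hpos (List.sum_eq_zero hall)
      obtain ⟨v, hv, hveq⟩ := List.mem_map.mp hx
      refine ⟨v, ?_, (PySem.Set.mem_ofList coords_b v).mp hv⟩
      have : 0 < List.count (v + d) coords_a := by omega
      exact List.count_pos_iff.mp this
    -- a qualifying offset lies in both scanned collections
    have hmemiff : ∀ d, m ≤ (pvSum coords_a coords_b d : Int) →
        (d ∈ PySem.List.pyRange (la - Mb) (Ma - lb + 1) ↔
          d ∈ (PySem.Set.ofList coords_a).foldl
            (fun s a => (PySem.Set.ofList coords_b).foldl (fun s b => PySem.Set.add s (a - b)) s)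
            PySem.Set.empty) := by
      intro d hd
      obtain ⟨v, hva, hvb⟩ := hkey d hd
      have h1 : la ≤ v + d := PySem.List.min?_isMin hla (v + d) hva
      have h2 : v + d ≤ Ma := PySem.List.max?_isMax hMa (v + d) hva
      have h3 : lb ≤ v := PySem.List.min?_isMin hlb v hvb
      have h4 : v ≤ Mb := PySem.List.max?_isMax hMb v hvb
      constructor
      · intro _
        rw [pvCand_mem_gen]
        exact Or.inr ⟨v + d, (PySem.Set.mem_ofList _ _).mpr hva,
          v, (PySem.Set.mem_ofList _ _).mpr hvb, by ring⟩
      · intro _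
        rw [PySem.List.mem_pyRange_one]
        omega
    -- both outputs are strictly increasing lists with the same members
    have hcandnd : ((PySem.Set.ofList coords_a).foldl
        (fun s a => (PySem.Set.ofList coords_b).foldl (fun s b => PySem.Set.add s (a - b)) s)
        PySem.Set.empty).Nodup :=
      pvCand_nodup_gen _ _ _ List.nodup_nil
    have hso1 : List.Pairwise (· < ·)
        ((PySem.List.pyRange (la - Mb) (Ma - lb + 1)).filter
          (fun d => decide (m ≤ pvALoop d m coords_b coords_a 0))) :=
      (PySem.List.pairwise_lt_pyRange_one _ _).filter _
    have hnd1 := hso1.imp (fun h => ne_of_lt h)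
    have hnd2' := ((PySem.List.sorted_perm _ (fun x : Int => x) false).nodup_iff).mpr hcandnd
    have hnd2 := hnd2'.filter
      (fun d => decide (m ≤ pvBCount (PySem.Dict.counter coords_a) d m
        ((PySem.Set.ofList coords_b).map (fun k => (k, (List.count k coords_b : Int)))) 0))
    have hso2 : List.Pairwise (· ≤ ·)
        ((PySem.List.sorted ((PySem.Set.ofList coords_a).foldl
            (fun s a => (PySem.Set.ofList coords_b).foldl (fun s b => PySem.Set.add s (a - b)) s)
            PySem.Set.empty) (fun x => x)).filter
          (fun d => decide (m ≤ pvBCount (PySem.Dict.counter coords_a) d m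
            ((PySem.Set.ofList coords_b).map (fun k => (k, (List.count k coords_b : Int)))) 0))) :=
      (PySem.List.sorted_pairwise _ (fun x : Int => x)).filter _
    have hperm := (List.perm_ext_iff_of_nodup hnd1 hnd2).mpr (by
      intro x
      simp only [List.mem_filter, decide_eq_true_eq, PySem.List.mem_sorted]
      constructor
      · rintro ⟨hxr, hxp⟩
        have hs := (hpred x).mp hxp
        exact ⟨(hmemiff x hs).mp hxr, (hpredB x).mpr hs⟩
      · rintro ⟨hxc, hxp⟩
        have hs := (hpredB x).mp hxp
        exact ⟨(hmemiff x hs).mpr hxc, (hpred x).mpr hs⟩)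
    exact List.Perm.eq_of_pairwise (fun a b _ _ h1 h2 => le_antisymm h1 h2)
      (hso1.imp (fun h => le_of_lt h)) hso2 hperm
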